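-- pv_equiv track=rewrite | github.com/medvedevgroup/mutation-rate-intervals | simulate_nucleotide_errors_v1.py | count_affected_kmers_linear
-- ===== SOURCE A (Python) =====
-- def count_affected_kmers_linear(seq,mutatedSeq,kmerSize):
-- 	assert (len(seq) == len(mutatedSeq))
-- 	assert (len(seq) >= kmerSize)
-- 	nKmers = len(seq) - (kmerSize-1)
-- 	nAffected = 0
-- 	for pos in range(nKmers):
-- 		if (seq[pos:pos+kmerSize] != mutatedSeq[pos:pos+kmerSize]):
-- 			nAffected += 1       # pos is 'affected'
-- 	return nAffected
-- ===== SOURCE B (Python) =====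
-- def count_affected_kmers_linear(seq, mutatedSeq, kmerSize):
-- 	assert (len(seq) == len(mutatedSeq))
-- 	assert (len(seq) >= kmerSize)
-- 	nAffected = 0
-- 	last = -1                      # most recent mismatch position seen so far
-- 	for j in range(len(seq)):
-- 		if seq[j] != mutatedSeq[j]:
-- 			last = j
-- 		pos = j - kmerSize + 1     # window whose last character is j
-- 		if pos >= 0 and last >= pos:
-- 			nAffected += 1
-- 	return nAffected
-- ===== Notes on version B (the rewrite author's own statement) =====
-- stated objective: faster
-- what changed: B replaces the per-window O(k) slice comparison with a single left-to-right pass that tracks the most recent mismatch position and counts a window as affected iff that position falls inside it, O(n) instead of O(n*k).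
-- outside the precondition, e.g. on count_affected_kmers_linear('ab', 'ba', -1): A returns 1, B returns 0
import Mathlib
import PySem

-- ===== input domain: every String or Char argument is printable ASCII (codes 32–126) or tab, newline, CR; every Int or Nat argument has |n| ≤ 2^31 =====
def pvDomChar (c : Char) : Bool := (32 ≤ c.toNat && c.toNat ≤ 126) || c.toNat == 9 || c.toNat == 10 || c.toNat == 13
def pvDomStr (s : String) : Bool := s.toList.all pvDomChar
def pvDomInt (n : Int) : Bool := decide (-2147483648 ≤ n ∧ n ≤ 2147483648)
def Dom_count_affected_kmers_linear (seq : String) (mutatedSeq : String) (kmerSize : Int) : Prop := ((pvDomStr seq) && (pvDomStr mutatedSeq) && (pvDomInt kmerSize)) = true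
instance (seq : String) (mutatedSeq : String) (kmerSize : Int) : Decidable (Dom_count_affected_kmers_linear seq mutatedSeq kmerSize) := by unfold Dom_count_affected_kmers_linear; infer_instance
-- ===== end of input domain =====

-- B does the same counting in one pass over the characters, tracking the most recent
-- mismatch position, instead of comparing a length-k slice per window.

-- ===== PORT A =====
def count_affected_kmers_linear (seq : String) (mutatedSeq : String) (kmerSize : Int) : Int :=
  let nKmers : Int := PySem.Str.len seq - (kmerSize - 1)
  (PySem.List.pyRange 0 nKmers 1).foldl
    (fun nAffected pos =>
      if PySem.List.slice seq.toList (some pos) (some (pos + kmerSize)) ≠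
         PySem.List.slice mutatedSeq.toList (some pos) (some (pos + kmerSize))
      then nAffected + 1 else nAffected) 0

-- ===== PORT B =====
def count_affected_kmers_linear_alt (seq : String) (mutatedSeq : String) (kmerSize : Int) : Int :=
  let r := (PySem.List.pyRange 0 (PySem.Str.len seq) 1).foldl
    (fun (st : Int × Int) j =>
      let last : Int := if PySem.Str.pyGet? seq j ≠ PySem.Str.pyGet? mutatedSeq j then j else st.2
      let pos : Int := j - kmerSize + 1
      ((if 0 ≤ pos ∧ pos ≤ last then st.1 + 1 else st.1), last))
    (0, -1)
  r.1

-- ===== PRECONDITION & SPEC =====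
-- Pre_ keeps A's asserts (equal lengths, length ≥ kmerSize) and additionally excludes a
-- NEGATIVE kmerSize, which is not a k-mer size: there A's slice stop pos+kmerSize is a
-- negative Python index and wraps around to the end of the string.
def Pre_count_affected_kmers_linear (seq : String) (mutatedSeq : String) (kmerSize : Int) : Prop :=
  PySem.Str.len seq = PySem.Str.len mutatedSeq ∧ kmerSize ≤ PySem.Str.len seq ∧ 0 ≤ kmerSize
instance (seq : String) (mutatedSeq : String) (kmerSize : Int) : Decidable (Pre_count_affected_kmers_linear seq mutatedSeq kmerSize) := by unfold Pre_count_affected_kmers_linear; infer_instance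

def pvWitness_count_affected_kmers_linear : String × String × Int := ("acgt", "aggt", 2)

def Spec_count_affected_kmers_linear (seq : String) (mutatedSeq : String) (kmerSize : Int) (out : Int) : Prop := out = count_affected_kmers_linear_alt seq mutatedSeq kmerSize
instance (seq : String) (mutatedSeq : String) (kmerSize : Int) (out : Int) : Decidable (Spec_count_affected_kmers_linear seq mutatedSeq kmerSize out) := by unfold Spec_count_affected_kmers_linear; infer_instance

-- ===== CLAIM (what is proved, stated in full; the proofs are below) =====
def Claim_equal_count_affected_kmers_linear : Prop := ∀ (seq : String) (mutatedSeq : String) (kmerSize : Int), Dom_count_affected_kmers_linear seq mutatedSeq kmerSize → Pre_count_affected_kmers_linear seq mutatedSeq kmerSize → Spec_count_affected_kmers_linear seq mutatedSeq kmerSize (count_affected_kmers_linear seq mutatedSeq kmerSize)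

-- ===== LEMMAS AND PROOFS =====

-- model of B's loop state, as plain recursions over the processed prefix length
def pvLast (s t : List Char) : Nat → Int
  | 0 => -1
  | i + 1 => if s[i]? ≠ t[i]? then (i : Int) else pvLast s t i

def pvCnt (s t : List Char) (k : Int) : Nat → Int
  | 0 => 0
  | i + 1 =>
      if 0 ≤ (i : Int) - k + 1 ∧ (i : Int) - k + 1 ≤ pvLast s t (i + 1)
      then pvCnt s t k i + 1 else pvCnt s t k i

theorem pvLast_lt (s t : List Char) (i : Nat) : pvLast s t i < (i : Int) := by
  induction i with
  | zero => simp [pvLast]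
  | succ i ih =>
      simp only [pvLast]
      split <;> omega

theorem pvLast_le_of_mism (s t : List Char) (i p : Nat) (hp : p < i)
    (hm : s[p]? ≠ t[p]?) : (p : Int) ≤ pvLast s t i := by
  induction i with
  | zero => omega
  | succ i ih =>
      simp only [pvLast]
      rcases Nat.lt_succ_iff_lt_or_eq.mp hp with h | h
      · have h2 := ih h
        split
        · have := pvLast_lt s t i
          omega
        · exact h2
      · subst h; simp [hm]

theorem pvLast_mism (s t : List Char) (i : Nat) (h : 0 ≤ pvLast s t i) :
    ∃ p : Nat, (p : Int) = pvLast s t i ∧ p < i ∧ s[p]? ≠ t[p]? := by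
  induction i with
  | zero => simp [pvLast] at h
  | succ i ih =>
      simp only [pvLast] at h ⊢
      by_cases hm : s[i]? ≠ t[i]?
      · exact ⟨i, by simp [hm], Nat.lt_succ_self i, hm⟩
      · simp [hm] at h ⊢
        obtain ⟨p, h1, h2, h3⟩ := ih h
        exact ⟨p, h1, by omega, h3⟩

-- the loop condition at step i decides "some mismatch lies in the window ending at i"
theorem pvCond_iff (s t : List Char) (k : Int) (k' : Nat) (hk : k = (k' : Int)) (i : Nat) :
    (0 ≤ (i : Int) - k + 1 ∧ (i : Int) - k + 1 ≤ pvLast s t (i + 1)) ↔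
    (k' ≤ i + 1 ∧ ∃ p < i + 1, i + 1 - k' ≤ p ∧ s[p]? ≠ t[p]?) := by
  subst hk
  constructor
  · rintro ⟨h0, hle⟩
    have hl : (0 : Int) ≤ pvLast s t (i + 1) := by omega
    obtain ⟨p, hp1, hp2, hp3⟩ := pvLast_mism s t (i + 1) hl
    exact ⟨by omega, p, by omega, by omega, hp3⟩
  · rintro ⟨hki, p, hp2, hp1, hp3⟩
    have h2 := pvLast_le_of_mism s t (i + 1) p (by omega) hp3
    exact ⟨by omega, by omega⟩

-- B's fold over the first i characters computes (pvCnt i, pvLast i)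
theorem pvFold_eq (seq mutatedSeq : String) (k : Int) (i : Nat) :
    (PySem.List.pyRange 0 (i : Int) 1).foldl
      (fun (st : Int × Int) j =>
        let last : Int := if PySem.Str.pyGet? seq j ≠ PySem.Str.pyGet? mutatedSeq j then j else st.2
        let pos : Int := j - k + 1
        ((if 0 ≤ pos ∧ pos ≤ last then st.1 + 1 else st.1), last)) (0, -1)
    = (pvCnt seq.toList mutatedSeq.toList k i, pvLast seq.toList mutatedSeq.toList i) := by
  induction i with
  | zero => simp [PySem.List.pyRange_one_eq_nil, pvCnt, pvLast]
  | succ i ih =>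
      rw [show ((i + 1 : Nat) : Int) = (i : Int) + 1 by push_cast; ring,
        PySem.List.pyRange_one_succ_right (by positivity), List.foldl_append, ih]
      simp only [List.foldl_cons, List.foldl_nil, pvCnt, pvLast, PySem.Str.pyGet?_natCast]
      rfl

-- the A-side fold is a countP of the window predicate
theorem pvAfold_eq (s t : List Char) (k : Int) (k' : Nat) (hk : k = (k' : Int)) (m : Nat) :
    (PySem.List.pyRange 0 (m : Int) 1).foldl
      (fun nAffected pos =>
        if PySem.List.slice s (some pos) (some (pos + k)) ≠
           PySem.List.slice t (some pos) (some (pos + k))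
        then nAffected + 1 else nAffected) 0
    = ((List.range m).countP
        (fun pos => decide ((s.drop pos).take k' ≠ (t.drop pos).take k')) : Int) := by
  subst hk
  induction m with
  | zero => simp [PySem.List.pyRange_one_eq_nil]
  | succ m ih =>
      rw [show ((m + 1 : Nat) : Int) = (m : Int) + 1 by push_cast; ring,
        PySem.List.pyRange_one_succ_right (by positivity), List.foldl_append, ih,
        List.range_succ, List.countP_append]
      simp only [List.foldl_cons, List.foldl_nil, List.countP_cons, List.countP_nil,
        PySem.List.slice_natCast_add]
      by_cases hc : (s.drop m).take k' ≠ (t.drop m).take k' <;> simp [hc]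

-- window predicate: the two k'-slices starting at pos differ iff a mismatch lies inside
theorem pvWin_iff (s t : List Char) (k' : Nat)
    (pos : Nat) (_hpos : pos + k' ≤ s.length) :
    ((s.drop pos).take k' ≠ (t.drop pos).take k') ↔
    ∃ p : Nat, pos ≤ p ∧ p < pos + k' ∧ s[p]? ≠ t[p]? := by
  constructor
  · intro hne
    by_contra hall
    simp only [not_exists, not_and, not_not, ne_eq] at hall
    apply hne
    apply List.ext_getElem?
    intro m
    by_cases hm : m < k'
    · rw [List.getElem?_take_of_lt hm, List.getElem?_take_of_lt hm,
        List.getElem?_drop, List.getElem?_drop]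
      exact hall (pos + m) (by omega) (by omega)
    · rw [List.getElem?_eq_none, List.getElem?_eq_none] <;>
        · simp only [List.length_take, List.length_drop]
          omega
  · rintro ⟨p, hp1, hp2, hp3⟩
    intro heq
    apply hp3
    have h := congrArg (fun l => l[p - pos]?) heq
    simp only at h
    rwa [List.getElem?_take_of_lt (by omega), List.getElem?_take_of_lt (by omega),
      List.getElem?_drop, List.getElem?_drop, Nat.add_sub_cancel' hp1] at h

theorem pvCnt_eq_countP (s t : List Char) (k : Int) (k' : Nat) (hk : k = (k' : Int)) (i : Nat) :
    pvCnt s t k i = ((List.range i).countP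
      (fun j => decide (k' ≤ j + 1 ∧ ∃ p < j + 1, j + 1 - k' ≤ p ∧ s[p]? ≠ t[p]?)) : Int) := by
  induction i with
  | zero => simp [pvCnt]
  | succ i ih =>
      rw [List.range_succ, List.countP_append]
      simp only [pvCnt, ih, List.countP_cons, List.countP_nil]
      rw [if_congr (pvCond_iff s t k k' hk i) rfl rfl]
      by_cases hc : k' ≤ i + 1 ∧ ∃ p < i + 1, i + 1 - k' ≤ p ∧ s[p]? ≠ t[p]?
      · rw [if_pos hc, decide_eq_true hc]
        push_cast
        simp
      · rw [if_neg hc, decide_eq_false hc]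
        push_cast
        simp

-- the two countP's agree
theorem pvCount_eq (s t : List Char) (k' : Nat) (hkn : k' ≤ s.length) :
    ((List.range (s.length - k' + 1)).countP
        (fun pos => decide ((s.drop pos).take k' ≠ (t.drop pos).take k'))) =
    ((List.range s.length).countP
        (fun j => decide (k' ≤ j + 1 ∧ ∃ p < j + 1, j + 1 - k' ≤ p ∧ s[p]? ≠ t[p]?))) := by
  rcases Nat.eq_zero_or_pos k' with hk0 | hk0
  · subst hk0
    rw [List.countP_eq_zero.mpr, List.countP_eq_zero.mpr]
    · intro j hj
      simp only [decide_eq_true_eq, not_and]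
      rintro - ⟨p, hp1, hp2, -⟩
      omega
    · intro pos hpos
      simp
  · have hsplit : List.range s.length
        = List.range (k' - 1) ++ (List.range (s.length - k' + 1)).map ((k' - 1) + ·) := by
      rw [← List.range_add]; congr 1; omega
    rw [hsplit, List.countP_append]
    have h1 : (List.range (k' - 1)).countP
        (fun j => decide (k' ≤ j + 1 ∧ ∃ p < j + 1, j + 1 - k' ≤ p ∧ s[p]? ≠ t[p]?)) = 0 := by
      rw [List.countP_eq_zero]
      intro j hj
      rw [List.mem_range] at hj
      simp only [decide_eq_true_eq, not_and]
      intro h; omega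
    rw [h1, Nat.zero_add, List.countP_map]
    apply List.countP_congr
    intro pos hpos
    rw [List.mem_range] at hpos
    simp only [Function.comp_apply, decide_eq_true_eq]
    rw [pvWin_iff s t k' pos (by omega)]
    constructor
    · rintro ⟨p, hp1, hp2, hp3⟩
      exact ⟨by omega, p, by omega, by omega, hp3⟩
    · rintro ⟨-, p, hp2, hp1, hp3⟩
      exact ⟨p, by omega, by omega, hp3⟩

-- ===== VERDICT (by name: the statement is the Claim_ definition above) =====
theorem count_affected_kmers_linear_spec : Claim_equal_count_affected_kmers_linear := by
  intro seq mutatedSeq kmerSize _ hpre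
  obtain ⟨hlen, hkn, hk0⟩ := hpre
  unfold Spec_count_affected_kmers_linear
  unfold count_affected_kmers_linear count_affected_kmers_linear_alt
  simp only [PySem.Str.len_eq] at hlen hkn ⊢
  set s := seq.toList with hs
  set t := mutatedSeq.toList with htl
  have ht : t.length = s.length := by exact_mod_cast hlen.symm
  set k' := kmerSize.toNat with hk'
  have hk : kmerSize = (k' : Int) := (Int.toNat_of_nonneg hk0).symm
  have hkn' : k' ≤ s.length := by omega
  have hK : (s.length : Int) - (kmerSize - 1) = ((s.length - k' + 1 : Nat) : Int) := by
    push_cast; omega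
  rw [hK, pvAfold_eq s t kmerSize k' hk, pvFold_eq seq mutatedSeq kmerSize s.length,
    pvCnt_eq_countP s t kmerSize k' hk, pvCount_eq s t k' hkn']
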